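-- pv_equiv track=rewrite | github.com/Caled4/projectEuler | ejercicio005.py | divisores
-- ===== SOURCE A (Python) =====
-- def divisores(numero):
--     numero=numero
--     rpta=[]
--     for div in range(1,11):
--
--         if numero%div==0:
--             rpta.append(div)
--             if len(rpta)==10:
--                 return True
-- ===== SOURCE B (Python) =====
-- def divisores(numero):
--     # 2520 = lcm(1..10): divisible by all of 1..10 iff divisible by 2520
--     if numero % 2520 == 0:
--         return True
-- ===== Notes on version B (the rewrite author's own statement) =====
-- stated objective: simpler
-- what changed: Replaced the loop over divisors 1..10 accumulating a list with a single closed-form divisibility test by lcm(1..10)=2520.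
import Mathlib
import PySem

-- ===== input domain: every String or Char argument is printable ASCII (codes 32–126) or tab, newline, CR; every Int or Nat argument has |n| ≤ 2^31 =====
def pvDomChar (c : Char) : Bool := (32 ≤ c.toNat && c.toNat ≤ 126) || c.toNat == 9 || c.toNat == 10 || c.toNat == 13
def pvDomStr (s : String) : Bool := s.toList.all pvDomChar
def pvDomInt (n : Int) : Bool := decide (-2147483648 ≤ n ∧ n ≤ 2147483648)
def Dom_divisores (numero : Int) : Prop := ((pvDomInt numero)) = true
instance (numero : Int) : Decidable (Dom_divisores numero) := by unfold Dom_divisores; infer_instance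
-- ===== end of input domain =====

-- B replaces A's loop over 1..10 with one closed-form test: divisible by all of 1..10 iff divisible by 2520 (simpler).

-- ===== PORT A =====
-- loop over range(1,11), accumulating rpta; early 'return True' when len(rpta)==10, fall-through → none
def divisoresLoop (numero : Int) : List Int → List Int → Option Bool
  | [], _ => none
  | d :: rest, rpta =>
    if PySem.Int.mod numero d == 0 then
      if (rpta ++ [d]).length == 10 then some true
      else divisoresLoop numero rest (rpta ++ [d])
    else divisoresLoop numero rest rpta

def divisores (numero : Int) : Option Bool :=
  divisoresLoop numero (PySem.List.pyRange 1 11 1) []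

-- ===== PORT B =====
def divisores_alt (numero : Int) : Option Bool :=
  if PySem.Int.mod numero 2520 == 0 then some true else none

-- ===== PRECONDITION & SPEC =====
def Spec_divisores (numero : Int) (out : Option Bool) : Prop := out = divisores_alt numero
instance (numero : Int) (out : Option Bool) : Decidable (Spec_divisores numero out) := by unfold Spec_divisores; infer_instance

-- ===== CLAIM (what is proved, stated in full; the proofs are below) =====
def Claim_equal_divisores : Prop := ∀ (numero : Int), Dom_divisores numero → Spec_divisores numero (divisores numero)

-- ===== LEMMAS AND PROOFS =====

theorem divisoresLoop_short (n : Int) (rest rpta : List Int)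
    (h : rpta.length + rest.length < 10) : divisoresLoop n rest rpta = none := by
  induction rest generalizing rpta with
  | nil => rfl
  | cons d rest ih =>
    simp only [divisoresLoop]
    split_ifs with h1 h2
    · exfalso; simp only [beq_iff_eq, List.length_append, List.length_cons, List.length_nil] at h2
      simp only [List.length_cons] at h; omega
    · exact ih _ (by simp only [List.length_append, List.length_cons, List.length_nil] at *; omega)
    · exact ih _ (by simp only [List.length_cons] at h; omega)

theorem divisoresLoop_full (n : Int) (rest rpta : List Int)
    (h : rpta.length + rest.length = 10) :
    divisoresLoop n rest rpta =
      if (∀ d ∈ rest, PySem.Int.mod n d = 0) ∧ rest ≠ [] then some true else none := by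
  induction rest generalizing rpta with
  | nil => simp [divisoresLoop]
  | cons d rest ih =>
    simp only [divisoresLoop]
    by_cases hd : PySem.Int.mod n d = 0
    · simp only [hd, beq_self_eq_true, if_true]
      rcases List.eq_nil_or_concat rest with hrest | _
      · subst hrest
        simp only [List.length_cons, List.length_nil] at h
        have hl : ((rpta ++ [d]).length == 10) = true := by
          simp only [List.length_append, List.length_cons, List.length_nil, beq_iff_eq]; omega
        simp only [hl, if_true]
        simp [hd]
      · have hne : rest ≠ [] := by rintro rfl; simp_all
        have hlen : ¬ ((rpta ++ [d]).length == 10) := by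
          simp only [List.length_append, List.length_cons, List.length_nil, beq_iff_eq]
          simp only [List.length_cons] at h
          have : 1 ≤ rest.length := List.length_pos_iff.mpr hne
          omega
        simp only [hlen, if_false, Bool.false_eq_true]
        rw [ih _ (by simp only [List.length_append, List.length_cons, List.length_nil] at *; omega)]
        simp [hd, hne]
    · have : ¬ (PySem.Int.mod n d == 0) = true := by simpa using hd
      simp only [this, if_false, Bool.false_eq_true]
      rw [divisoresLoop_short n rest rpta (by simp only [List.length_cons] at h; omega)]
      simp [hd]

set_option maxHeartbeats 1000000 in
theorem divisores_spec : Claim_equal_divisores := by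
  intro n _
  unfold Spec_divisores divisores divisores_alt
  have hr : PySem.List.pyRange 1 11 1 = [1,2,3,4,5,6,7,8,9,10] := by decide
  rw [hr, divisoresLoop_full n _ _ (by rfl)]
  have key : (∀ d ∈ ([1,2,3,4,5,6,7,8,9,10] : List Int), PySem.Int.mod n d = 0) ↔ (2520:Int) ∣ n := by
    simp only [List.mem_cons, List.not_mem_nil, forall_eq_or_imp,
      IsEmpty.forall_iff, PySem.Int.mod_eq_zero_iff_dvd]
    constructor
    · rintro ⟨_, _, _, _, h5, _, h7, h8, h9, _, _⟩
      have h72 : (72:Int) ∣ n :=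
        (IsCoprime.mul_dvd (by norm_num [Int.isCoprime_iff_gcd_eq_one]) h8 h9)
      have h360 : (360:Int) ∣ n :=
        (IsCoprime.mul_dvd (by norm_num [Int.isCoprime_iff_gcd_eq_one]) h5 h72)
      exact (IsCoprime.mul_dvd (by norm_num [Int.isCoprime_iff_gcd_eq_one]) h7 h360)
    · intro h
      exact ⟨one_dvd n, dvd_trans (by norm_num : (2:Int) ∣ 2520) h,
        dvd_trans (by norm_num : (3:Int) ∣ 2520) h, dvd_trans (by norm_num : (4:Int) ∣ 2520) h,
        dvd_trans (by norm_num : (5:Int) ∣ 2520) h, dvd_trans (by norm_num : (6:Int) ∣ 2520) h,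
        dvd_trans (by norm_num : (7:Int) ∣ 2520) h, dvd_trans (by norm_num : (8:Int) ∣ 2520) h,
        dvd_trans (by norm_num : (9:Int) ∣ 2520) h, dvd_trans (by norm_num : (10:Int) ∣ 2520) h, fun _ => trivial⟩
  by_cases h : (2520 : Int) ∣ n
  · rw [if_pos ⟨key.mpr h, by simp⟩]
    have hm : (PySem.Int.mod n 2520 == 0) = true := by
      simpa [PySem.Int.mod_eq_zero_iff_dvd] using h
    rw [if_pos hm]
  · rw [if_neg (by rintro ⟨hall, _⟩; exact h (key.mp hall))]
    have hm : ¬ ((PySem.Int.mod n 2520 == 0) = true) := by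
      simpa [PySem.Int.mod_eq_zero_iff_dvd] using h
    rw [if_neg hm]
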